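-- pv_equiv track=rewrite | github.com/andresesfm/coding_challenges | MITOpenCourseWare/text_justification.py | badness
-- ===== SOURCE A (Python) =====
-- words = [2, 4, 1]#, 5, 9, 1, 1]
--
-- line_lenght = 10
--
-- MAX = 10000000000
--
-- def badness(i, j):
--     bad = 0
--     for k in range(i, j):
--         bad += words[k]
--     if(line_lenght<bad):
--         return MAX*3
--     else:
--         return pow(line_lenght-bad, 3)
-- ===== SOURCE B (Python) =====
-- words = [2, 4, 1]
--
-- line_lenght = 10
--
-- MAX = 10000000000
--
-- # Prefix sums of words: PREFIX[k] = sum(words[:k]); range sum is one subtraction.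
-- PREFIX = [0, 2, 6, 7]
--
-- def badness(i, j):
--     slack = line_lenght - (PREFIX[j] - PREFIX[i] if i < j else 0)
--     return slack ** 3 if slack >= 0 else MAX * 3
-- ===== Notes on version B (the rewrite author's own statement) =====
-- stated objective: faster
-- what changed: Replaces the O(j-i) summation loop over words[i:j] with a precomputed prefix-sum table (range sum by one subtraction) and branches on the sign of the slack instead of comparing the sum to the line length.
-- outside the precondition, e.g. on badness(-1, 1): A returns 343, B returns 3375
import Mathlib
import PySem

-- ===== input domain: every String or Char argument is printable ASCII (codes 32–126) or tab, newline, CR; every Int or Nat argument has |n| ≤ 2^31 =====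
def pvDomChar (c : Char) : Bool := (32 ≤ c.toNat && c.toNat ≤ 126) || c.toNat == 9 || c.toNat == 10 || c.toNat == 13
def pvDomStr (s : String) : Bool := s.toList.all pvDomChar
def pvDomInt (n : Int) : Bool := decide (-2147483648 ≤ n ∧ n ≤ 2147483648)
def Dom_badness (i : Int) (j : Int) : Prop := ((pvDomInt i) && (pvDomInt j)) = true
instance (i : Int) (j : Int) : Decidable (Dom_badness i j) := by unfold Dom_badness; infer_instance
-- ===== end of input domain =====

-- B replaces A's per-index summation loop with a precomputed prefix-sum table and branches on the sign of the slack (faster: O(1) range sum).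


-- ===== PORT A =====
def badness (i : Int) (j : Int) : Int :=
  let bad := (PySem.List.pyRange i j 1).foldl
    (fun acc k => acc + (PySem.List.pyGet? ([2, 4, 1] : List Int) k).getD 0) 0
  if 10 < bad then 10000000000 * 3 else (10 - bad) ^ 3

-- ===== PORT B =====
def badness_alt (i : Int) (j : Int) : Int :=
  let slack : Int := 10 -
    (if i < j then
       (PySem.List.pyGet? ([0, 2, 6, 7] : List Int) j).getD 0
         - (PySem.List.pyGet? ([0, 2, 6, 7] : List Int) i).getD 0
     else 0)
  if 0 ≤ slack then slack ^ 3 else 10000000000 * 3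

-- ===== PRECONDITION & SPEC =====
-- Pre_ excludes inputs where A reads words (or B reads PREFIX) via Python negative-index
-- wraparound, an accidental corner where both programs' values are implementation artefacts,
-- and inputs where a nonempty range reaches index ≥ 3, on which A raises IndexError.
def Pre_badness (i : Int) (j : Int) : Prop := j ≤ i ∨ (0 ≤ i ∧ j ≤ 3)
instance (i : Int) (j : Int) : Decidable (Pre_badness i j) := by unfold Pre_badness; infer_instance
def pvWitness_badness : Int × Int := (0, 3)
def Spec_badness (i : Int) (j : Int) (out : Int) : Prop := out = badness_alt i j
instance (i : Int) (j : Int) (out : Int) : Decidable (Spec_badness i j out) := by unfold Spec_badness; infer_instance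

-- ===== CLAIM (what is proved, stated in full; the proofs are below) =====
def Claim_equal_badness : Prop := ∀ (i : Int) (j : Int), Dom_badness i j → Pre_badness i j → Spec_badness i j (badness i j)

-- ===== LEMMAS AND PROOFS =====

-- ===== VERDICT (by name: the statement is the Claim_ definition above) =====
theorem badness_spec : Claim_equal_badness := by
  intro i j _ hpre
  unfold Spec_badness
  by_cases hij : i < j
  · have h0 : 0 ≤ i := by rcases hpre with h | ⟨h0, _⟩ <;> omega
    have h3 : j ≤ 3 := by rcases hpre with h | ⟨_, h3⟩ <;> omega
    have hi2 : i ≤ 2 := by omega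
    have hj1 : 1 ≤ j := by omega
    interval_cases i <;> interval_cases j <;> decide
  · have h : j ≤ i := le_of_not_gt hij
    simp [badness, badness_alt, PySem.List.pyRange_one_eq_nil h, hij]
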